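-- pv_equiv track=rewrite | github.com/algorithmx/fortran2julia | Utinity.py | split_quote_core
-- ===== SOURCE A (Python) =====
-- def split_quote_core(s0,Q):
--     found = False
--     for q in Q:
--         if q in s0:
--             found = True
--             ll = s0.split(q,1)
--             return split_quote_core(ll[0],Q) + [q] + split_quote_core(ll[1],Q)
--         else:
--             continue
--
--     if not found:
--         return [s0]
-- ===== SOURCE B (Python) =====
-- def split_quote_core(s0, Q):
--     # Iterative re-implementation: explicit worklist instead of recursion.
--     # Items are (is_separator, text); segments are split at the first (by
--     # priority order in Q) quote found via str.find, pieces pushed back.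
--     out = []
--     stack = [(False, s0)]
--     while stack:
--         is_sep, v = stack.pop()
--         if is_sep:
--             out.append(v)
--             continue
--         for q in Q:
--             i = v.find(q)
--             if i >= 0:
--                 stack.append((False, v[i + len(q):]))
--                 stack.append((True, q))
--                 stack.append((False, v[:i]))
--                 break
--         else:
--             out.append(v)
--     return out
-- ===== Notes on version B (the rewrite author's own statement) =====
-- stated objective: alternative
-- what changed: A's recursion (split at the first priority-matching quote, recurse on both halves) is replaced by an iterative explicit-worklist loop that locates each split point with str.find and pushes the slices back, building the output left to right with no recursion.
import Mathlib
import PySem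

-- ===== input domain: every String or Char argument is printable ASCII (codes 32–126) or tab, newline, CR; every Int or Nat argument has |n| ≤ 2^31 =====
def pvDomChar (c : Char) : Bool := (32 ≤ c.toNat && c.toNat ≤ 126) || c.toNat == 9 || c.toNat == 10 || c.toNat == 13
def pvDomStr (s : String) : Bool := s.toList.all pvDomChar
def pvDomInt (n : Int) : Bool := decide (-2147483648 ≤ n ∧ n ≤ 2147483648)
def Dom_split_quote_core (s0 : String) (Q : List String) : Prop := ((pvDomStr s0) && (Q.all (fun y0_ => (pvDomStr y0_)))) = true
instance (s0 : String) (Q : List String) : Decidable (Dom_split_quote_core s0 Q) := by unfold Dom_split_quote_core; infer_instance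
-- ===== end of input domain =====

-- B replaces A's recursive split-and-recurse with an explicit worklist loop (alternative decomposition, same results).

-- ===== PORT A =====
-- A ported over List Char (strings enter via toList, leave via String.ofList).

-- the 'for q in Q: if q in s0: … return' loop: first q of Q occurring in s
def pvPickA (s : List Char) : List (List Char) → Option (List Char)
  | [] => none
  | q :: rest => if PySem.Chars.isIn q s then some q else pvPickA s rest

-- fuel only makes the recursion total: when '' ∉ Q the depth is ≤ |s|+1 and the 0-case is never hit
def pvRunA (Q : List (List Char)) : Nat → List Char → List (List Char)
  | 0, s => [s]
  | fuel+1, s =>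
    match pvPickA s Q with
    | none => [s]                                    -- 'if not found: return [s0]'
    | some q =>
      match PySem.Chars.splitMax? s q 1 with         -- ll = s0.split(q, 1); none = ValueError, excluded by Pre_
      | some [l, r] => pvRunA Q fuel l ++ [q] ++ pvRunA Q fuel r
      | _ => [s]                                     -- unreachable: a found nonempty separator gives exactly two parts

def split_quote_core (s0 : String) (Q : List String) : List String :=
  (pvRunA (Q.map String.toList) (s0.toList.length + 1) s0.toList).map String.ofList

-- ===== PORT B =====
-- B ported over List Char as well; the worklist holds (is_separator, text) pairs.

-- the 'for q in Q: i = v.find(q); if i >= 0: … break' scan: first q of Q with its find index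
def pvFindB (v : List Char) : List (List Char) → Option (List Char × Int)
  | [] => none
  | q :: rest =>
      if 0 ≤ PySem.Chars.find v q then some (q, PySem.Chars.find v q) else pvFindB v rest

-- the 'while stack' loop; fuel only makes it total (when '' ∉ Q it runs ≤ 3|s0|+1 iterations)
def pvRunB (Q : List (List Char)) : Nat → List (Bool × List Char) → List (List Char) → List (List Char)
  | _, [], out => out
  | 0, _ :: _, out => out
  | fuel+1, (true, v) :: st, out => pvRunB Q fuel st (out ++ [v])
  | fuel+1, (false, v) :: st, out =>
    match pvFindB v Q with
    | none => pvRunB Q fuel st (out ++ [v])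
    | some (q, i) =>
        pvRunB Q fuel
          ((false, PySem.List.slice v none (some i)) ::        -- v[:i]
           (true, q) ::
           (false, PySem.List.slice v (some (i + q.length)) none) ::  -- v[i+len(q):]
           st) out

def split_quote_core_alt (s0 : String) (Q : List String) : List String :=
  (pvRunB (Q.map String.toList) (3 * s0.toList.length + 1) [(false, s0.toList)] []).map String.ofList

-- ===== PRECONDITION & SPEC =====
-- Pre_ excludes exactly the inputs where A raises: '' ∈ Q makes s0.split('', 1) raise ValueError.
def Pre_split_quote_core (s0 : String) (Q : List String) : Prop := "" ∉ Q
instance (s0 : String) (Q : List String) : Decidable (Pre_split_quote_core s0 Q) := by unfold Pre_split_quote_core; infer_instance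
def pvWitness_split_quote_core : String × List String := ("a \"b\" 'c'", ["\"", "'"])

def Spec_split_quote_core (s0 : String) (Q : List String) (out : List String) : Prop := out = split_quote_core_alt s0 Q
instance (s0 : String) (Q : List String) (out : List String) : Decidable (Spec_split_quote_core s0 Q out) := by unfold Spec_split_quote_core; infer_instance

-- ===== CLAIM (what is proved, stated in full; the proofs are below) =====
def Claim_equal_split_quote_core : Prop := ∀ (s0 : String) (Q : List String), Dom_split_quote_core s0 Q → Pre_split_quote_core s0 Q → Spec_split_quote_core s0 Q (split_quote_core s0 Q)

-- ===== LEMMAS AND PROOFS =====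

-- first-occurrence index of q in l, structurally (mirrors PySem.Chars.find.go)
def pvFF (q : List Char) : List Char → Option Nat
  | [] => if q.isEmpty then some 0 else none
  | c :: rest => if q.isPrefixOf (c :: rest) then some 0 else (pvFF q rest).map (· + 1)

theorem pvFF_go (q : List Char) : ∀ (l : List Char) (k : Nat),
    PySem.Chars.find.go q l k = (match pvFF q l with | some i => ((k + i : Nat) : Int) | none => -1) := by
  intro l
  induction l with
  | nil => intro k; simp [PySem.Chars.find.go, pvFF]; split <;> simp
  | cons c rest ih =>
    intro k
    rw [PySem.Chars.find.go]
    by_cases hp : q.isPrefixOf (c :: rest) = true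
    · simp [pvFF, hp]
    · simp only [pvFF, hp, Bool.false_eq_true, if_false, ih (k+1)]
      cases h : pvFF q rest
      · simp
      · simp; ring

theorem pvFF_find (q l : List Char) :
    PySem.Chars.find l q = (match pvFF q l with | some i => (i : Int) | none => -1) := by
  have := pvFF_go q l 0
  simpa [PySem.Chars.find] using this

theorem pvFF_le {q : List Char} : ∀ {l : List Char} {i : Nat}, pvFF q l = some i → i + q.length ≤ l.length := by
  intro l
  induction l with
  | nil =>
    intro i h
    simp only [pvFF] at h
    split at h
    · rename_i hq
      simp only [List.isEmpty_iff] at hq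
      simp only [Option.some.injEq] at h
      simp [hq, ← h]
    · exact absurd h (by simp)
  | cons c rest ih =>
    intro i h
    simp only [pvFF] at h
    split at h
    · rename_i hp
      have := (List.isPrefixOf_iff_prefix.mp hp).length_le
      simp at h
      simp [← h]; simpa using this
    · cases hr : pvFF q rest with
      | none => simp [hr] at h
      | some j =>
        simp [hr] at h
        have := ih hr
        simp [← h]; omega

theorem pvGo0 (q : List Char) : ∀ (fuel : Nat) (l cur : List Char) (acc : List (List Char)),
    PySem.Chars.splitOnMax.go q fuel 0 l cur acc = ((cur.reverse ++ l) :: acc).reverse := by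
  intro fuel l cur acc
  match fuel, l with
  | 0, l => simp [PySem.Chars.splitOnMax.go]
  | fuel+1, [] => simp [PySem.Chars.splitOnMax.go]
  | fuel+1, c :: rest => simp [PySem.Chars.splitOnMax.go]

theorem pvGo1 (q : List Char) (hq : q ≠ []) : ∀ (l : List Char) (fuel : Nat) (cur : List Char)
    (acc : List (List Char)), l.length < fuel →
    PySem.Chars.splitOnMax.go q fuel 1 l cur acc = acc.reverse ++
      (match pvFF q l with
        | some i => [cur.reverse ++ l.take i, l.drop (i + q.length)]
        | none => [cur.reverse ++ l]) := by
  intro l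
  induction l with
  | nil =>
    intro fuel cur acc _
    have hFF : pvFF q [] = none := by simp [pvFF, List.isEmpty_iff, hq]
    rw [hFF]
    match fuel with
    | 0 => rw [PySem.Chars.splitOnMax.go]; simp
    | fuel+1 => simp [PySem.Chars.splitOnMax.go]
  | cons c rest ih =>
    intro fuel cur acc hf
    match fuel, hf with
    | fuel+1, hf =>
      rw [PySem.Chars.splitOnMax.go]
      simp only [if_neg (by omega : ¬ (1:Nat) = 0)]
      by_cases hp : q.isPrefixOf (c :: rest) = true
      · rw [if_pos hp, pvGo0]
        have hFF : pvFF q (c :: rest) = some 0 := by simp [pvFF, hp]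
        rw [hFF]
        simp
      · rw [if_neg hp]
        have hrest : rest.length < fuel := by simpa using Nat.lt_of_succ_lt_succ hf
        rw [ih fuel (c :: cur) acc hrest]
        have hFF : pvFF q (c :: rest) = (pvFF q rest).map (· + 1) := by simp [pvFF, hp]
        rw [hFF]
        cases h : pvFF q rest with
        | none => simp
        | some i =>
          simp only [Option.map_some]
          have h1 : i + 1 + q.length = (i + q.length) + 1 := by omega
          simp [List.take_succ_cons, h1, List.drop_succ_cons]

theorem pvSplit1 (q l : List Char) (hq : q ≠ []) :
    PySem.Chars.splitMax? l q 1 = some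
      (match pvFF q l with
        | some i => [l.take i, l.drop (i + q.length)]
        | none => [l]) := by
  rw [PySem.Chars.splitMax?]
  rw [if_neg (by simpa [List.isEmpty_iff] using hq)]
  rw [PySem.Chars.splitOnMax]
  rw [if_neg (by omega : ¬ (1:Int) < 0)]
  have ht : Int.toNat 1 = 1 := rfl
  rw [ht, pvGo1 q hq l (l.length+1) [] [] (by omega)]
  cases h : pvFF q l <;> simp

theorem pvRunB_nil (Qs : List (List Char)) (fuel : Nat) (out : List (List Char)) :
    pvRunB Qs fuel [] out = out := by cases fuel <;> rfl

theorem pvRunB_sep (Qs : List (List Char)) (fuel : Nat) (v : List Char)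
    (st : List (Bool × List Char)) (out : List (List Char)) :
    pvRunB Qs (fuel+1) ((true, v) :: st) out = pvRunB Qs fuel st (out ++ [v]) := rfl

theorem pvRunB_segstep (Qs : List (List Char)) (fuel : Nat) (v : List Char)
    (st : List (Bool × List Char)) (out : List (List Char)) :
    pvRunB Qs (fuel+1) ((false, v) :: st) out =
      (match pvFindB v Qs with
       | none => pvRunB Qs fuel st (out ++ [v])
       | some (q, i) =>
          pvRunB Qs fuel
            ((false, PySem.List.slice v none (some i)) :: (true, q) ::
             (false, PySem.List.slice v (some (i + q.length)) none) :: st) out) := rfl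

theorem pvRunA_succ (Qs : List (List Char)) (fuel : Nat) (s : List Char) :
    pvRunA Qs (fuel+1) s =
      (match pvPickA s Qs with
       | none => [s]
       | some q =>
          match PySem.Chars.splitMax? s q 1 with
          | some [l, r] => pvRunA Qs fuel l ++ [q] ++ pvRunA Qs fuel r
          | _ => [s]) := rfl

theorem pvFindB_eq_pick (v : List Char) : ∀ (Qs : List (List Char)),
    pvFindB v Qs = (pvPickA v Qs).map (fun q => (q, PySem.Chars.find v q)) := by
  intro Qs
  induction Qs with
  | nil => rfl
  | cons q rest ih =>
    have hiff : (0 ≤ PySem.Chars.find v q) ↔ (PySem.Chars.isIn q v = true) := by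
      rw [PySem.Chars.find_nonneg_iff, PySem.Chars.isIn_iff_infix]
    by_cases h : PySem.Chars.isIn q v = true
    · simp [pvFindB, pvPickA, h, hiff.mpr h]
    · have h2 : ¬ (0 ≤ PySem.Chars.find v q) := fun hc => h (hiff.mp hc)
      simp [pvFindB, pvPickA, h, h2, ih]

theorem pvPickA_mem {v q : List Char} : ∀ {Qs : List (List Char)},
    pvPickA v Qs = some q → q ∈ Qs ∧ PySem.Chars.isIn q v = true := by
  intro Qs
  induction Qs with
  | nil => intro h; simp [pvPickA] at h
  | cons p rest ih =>
    intro h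
    by_cases hp : PySem.Chars.isIn p v = true
    · simp [pvPickA, hp] at h
      exact ⟨by simp [← h], by rw [← h]; exact hp⟩
    · simp [pvPickA, hp] at h
      obtain ⟨h1, h2⟩ := ih h
      exact ⟨List.mem_cons_of_mem _ h1, h2⟩

-- when q is found in v, pvFF returns its index
theorem pvFF_of_isIn {q v : List Char} (h : PySem.Chars.isIn q v = true) :
    ∃ i, pvFF q v = some i ∧ PySem.Chars.find v q = (i : Int) := by
  have hne : PySem.Chars.find v q ≠ -1 := by
    rw [PySem.Chars.find_ne_neg_one_iff, ← PySem.Chars.isIn_iff_infix]; exact h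
  have := pvFF_find q v
  cases hFF : pvFF q v with
  | none => rw [hFF] at this; exact absurd this hne
  | some i => exact ⟨i, rfl, by rw [hFF] at this; exact this⟩

-- A's result does not depend on the fuel, as long as fuel > |v| (when '' ∉ Q)
theorem pvRunA_fuel {Qs : List (List Char)} (hQ : [] ∉ Qs) :
    ∀ (n : Nat) (v : List Char), v.length ≤ n → ∀ fuel, v.length < fuel →
      pvRunA Qs fuel v = pvRunA Qs (v.length + 1) v := by
  intro n
  induction n using Nat.strong_induction_on with
  | _ n ih =>
    intro v hv fuel hf
    match fuel, hf with
    | f+1, hf =>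
      rw [pvRunA_succ, pvRunA_succ]
      cases hpick : pvPickA v Qs with
      | none => rfl
      | some q =>
        obtain ⟨hmem, hIn⟩ := pvPickA_mem hpick
        have hqne : q ≠ [] := fun h => hQ (h ▸ hmem)
        have hq1 : 1 ≤ q.length := List.length_pos_iff.mpr hqne
        obtain ⟨i, hFF, _⟩ := pvFF_of_isIn hIn
        have hle := pvFF_le hFF
        dsimp only
        rw [pvSplit1 q v hqne, hFF]
        dsimp only
        have hlenl : (v.take i).length = i := by simp; omega
        have hlenr : (v.drop (i + q.length)).length = v.length - i - q.length := by simp; omega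
        have hvpos : 1 ≤ v.length := by omega
        have hl_lt : (v.take i).length < v.length := by omega
        have hr_lt : (v.drop (i + q.length)).length < v.length := by omega
        rw [ih (v.take i).length (by omega) (v.take i) le_rfl f (by omega),
            ih (v.take i).length (by omega) (v.take i) le_rfl v.length (by omega),
            ih (v.drop (i + q.length)).length (by omega) (v.drop (i + q.length)) le_rfl f (by omega),
            ih (v.drop (i + q.length)).length (by omega) (v.drop (i + q.length)) le_rfl v.length (by omega)]

-- weight of B's worklist: an upper bound on the remaining iterations
def pvMu : List (Bool × List Char) → Nat
  | [] => 0
  | (true, _) :: st => 1 + pvMu st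
  | (false, v) :: st => 3 * v.length + 1 + pvMu st

theorem pvRunB_fuel {Qs : List (List Char)} (hQ : [] ∉ Qs) :
    ∀ (n : Nat) (st : List (Bool × List Char)), pvMu st ≤ n →
      ∀ (out : List (List Char)) (fuel fuel' : Nat), pvMu st ≤ fuel → pvMu st ≤ fuel' →
      pvRunB Qs fuel st out = pvRunB Qs fuel' st out := by
  intro n
  induction n using Nat.strong_induction_on with
  | _ n ih =>
    intro st hst out fuel fuel' h1 h2
    match st with
    | [] => rw [pvRunB_nil, pvRunB_nil]
    | (true, v) :: st' =>
      simp only [pvMu] at hst h1 h2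
      obtain ⟨f, rfl⟩ : ∃ f, fuel = f + 1 := ⟨fuel - 1, by omega⟩
      obtain ⟨f', rfl⟩ : ∃ f', fuel' = f' + 1 := ⟨fuel' - 1, by omega⟩
      rw [pvRunB_sep, pvRunB_sep]
      exact ih (n-1) (by omega) st' (by omega) (out ++ [v]) f f' (by omega) (by omega)
    | (false, v) :: st' =>
      simp only [pvMu] at hst h1 h2
      obtain ⟨f, rfl⟩ : ∃ f, fuel = f + 1 := ⟨fuel - 1, by omega⟩
      obtain ⟨f', rfl⟩ : ∃ f', fuel' = f' + 1 := ⟨fuel' - 1, by omega⟩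
      rw [pvRunB_segstep, pvRunB_segstep]
      cases hfind : pvFindB v Qs with
      | none =>
        simp only
        exact ih (n-1) (by omega) st' (by omega) (out ++ [v]) f f' (by omega) (by omega)
      | some qi =>
        obtain ⟨q, i⟩ := qi
        simp only
        have hpe := pvFindB_eq_pick v Qs
        rw [hfind] at hpe
        cases hpick : pvPickA v Qs with
        | none => rw [hpick] at hpe; simp at hpe
        | some p =>
          rw [hpick] at hpe
          simp at hpe
          obtain ⟨hqp, hi⟩ := hpe
          obtain ⟨hmem, hIn⟩ := pvPickA_mem hpick
          subst hqp
          have hqne : q ≠ [] := fun h => hQ (h ▸ hmem)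
          have hq1 : 1 ≤ q.length := List.length_pos_iff.mpr hqne
          obtain ⟨j, hFF, hfd⟩ := pvFF_of_isIn hIn
          have hle := pvFF_le hFF
          have hij : i = (j : Int) := by rw [hi, hfd]
          subst hij
          rw [PySem.List.slice_to v (by omega : (0:Int) ≤ (j:Int))]
          rw [PySem.List.slice_from v (by omega : (0:Int) ≤ (j:Int) + q.length)]
          have ht1 : ((j : Int)).toNat = j := by omega
          have ht2 : ((j : Int) + q.length).toNat = j + q.length := by omega
          rw [ht1, ht2]
          have hmu : 3 * (v.take j).length + 1 + (1 + (3 * (v.drop (j + q.length)).length + 1 + pvMu st'))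
              ≤ 3 * v.length + pvMu st' := by
            simp only [List.length_take, List.length_drop]
            omega
          exact ih (n-1) (by omega)
            ((false, v.take j) :: (true, q) :: (false, v.drop (j + q.length)) :: st')
            (by simp only [pvMu]; omega) out f f'
            (by simp only [pvMu]; omega) (by simp only [pvMu]; omega)

-- B consumes one segment exactly as A expands it
theorem pvRunB_seg {Qs : List (List Char)} (hQ : [] ∉ Qs) :
    ∀ (n : Nat) (v : List Char), v.length ≤ n →
      ∀ (st : List (Bool × List Char)) (out : List (List Char)),
      pvRunB Qs (pvMu ((false, v) :: st)) ((false, v) :: st) out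
        = pvRunB Qs (pvMu st) st (out ++ pvRunA Qs (v.length + 1) v) := by
  intro n
  induction n using Nat.strong_induction_on with
  | _ n ih =>
    intro v hv st out
    have hmu1 : pvMu ((false, v) :: st) = (3 * v.length + pvMu st) + 1 := by
      simp only [pvMu]; omega
    rw [hmu1, pvRunB_segstep, pvRunA_succ]
    cases hfind : pvFindB v Qs with
    | none =>
      simp only
      have hpe := pvFindB_eq_pick v Qs
      rw [hfind] at hpe
      cases hpick : pvPickA v Qs with
      | some p => rw [hpick] at hpe; simp at hpe
      | none =>
        dsimp only
        exact pvRunB_fuel hQ (pvMu st) st le_rfl (out ++ [v]) _ _ (by omega) le_rfl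
    | some qi =>
      obtain ⟨q, i⟩ := qi
      simp only
      have hpe := pvFindB_eq_pick v Qs
      rw [hfind] at hpe
      cases hpick : pvPickA v Qs with
      | none => rw [hpick] at hpe; simp at hpe
      | some p =>
        rw [hpick] at hpe
        simp at hpe
        obtain ⟨hqp, hi⟩ := hpe
        obtain ⟨hmem, hIn⟩ := pvPickA_mem hpick
        subst hqp
        have hqne : q ≠ [] := fun h => hQ (h ▸ hmem)
        have hq1 : 1 ≤ q.length := List.length_pos_iff.mpr hqne
        obtain ⟨j, hFF, hfd⟩ := pvFF_of_isIn hIn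
        have hle := pvFF_le hFF
        have hij : i = (j : Int) := by rw [hi, hfd]
        subst hij
        dsimp only
        rw [pvSplit1 q v hqne, hFF]
        dsimp only
        rw [PySem.List.slice_to v (by omega : (0:Int) ≤ (j:Int))]
        rw [PySem.List.slice_from v (by omega : (0:Int) ≤ (j:Int) + q.length)]
        have ht1 : ((j : Int)).toNat = j := by omega
        have ht2 : ((j : Int) + q.length).toNat = j + q.length := by omega
        rw [ht1, ht2]
        have hlenl : (v.take j).length = j := by simp; omega
        have hlenr : (v.drop (j + q.length)).length = v.length - j - q.length := by simp; omega
        have hvpos : 1 ≤ v.length := by omega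
        -- normalise the fuel to the weight of the new stack, then peel the three items
        have hmu2 : pvMu ((false, v.take j) :: (true, q) :: (false, v.drop (j + q.length)) :: st)
            ≤ 3 * v.length + pvMu st := by simp only [pvMu]; omega
        rw [pvRunB_fuel hQ _ _ le_rfl out (3 * v.length + pvMu st) _ hmu2 le_rfl]
        rw [ih (v.take j).length (by omega) (v.take j) le_rfl]
        have hmu3 : pvMu ((true, q) :: (false, v.drop (j + q.length)) :: st)
            = (pvMu ((false, v.drop (j + q.length)) :: st)) + 1 := by simp only [pvMu]; omega
        rw [hmu3, pvRunB_sep]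
        rw [ih (v.drop (j + q.length)).length (by omega) (v.drop (j + q.length)) le_rfl]
        rw [pvRunA_fuel hQ (v.take j).length (v.take j) le_rfl v.length (by omega),
            pvRunA_fuel hQ (v.drop (j + q.length)).length (v.drop (j + q.length)) le_rfl v.length (by omega)]
        rw [hlenl, hlenr]
        simp [List.append_assoc]

theorem pvNil_notMem {Q : List String} (h : "" ∉ Q) : [] ∉ Q.map String.toList := by
  intro hmem
  obtain ⟨x, hx, hxe⟩ := List.mem_map.mp hmem
  exact h (String.toList_eq_nil_iff.mp hxe ▸ hx)

-- ===== VERDICT (by name: the statement is the Claim_ definition above) =====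
theorem split_quote_core_spec : Claim_equal_split_quote_core := by
  intro s0 Q _hdom hpre
  unfold Spec_split_quote_core
  have hQ : [] ∉ Q.map String.toList := pvNil_notMem hpre
  unfold split_quote_core split_quote_core_alt
  congr 1
  have h1 : pvMu [(false, s0.toList)] = 3 * s0.toList.length + 1 := by simp [pvMu]
  have h2 := pvRunB_seg hQ s0.toList.length s0.toList le_rfl [] []
  rw [h1.symm]
  rw [h2]
  simp [pvMu, pvRunB]
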